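-- pv_equiv track=rewrite | github.com/kahenyamercy/alx-interview | 0x04-utf8_validation/0-validate_utf8.py | validUTF8
-- ===== SOURCE A (Python) =====
-- def validUTF8(data):
--     """Determines if a given data set represents a valid UTF-8 encoding"""
--
--     # Count of remaining bytes expected in the current sequence
--     remaining_bytes = 0
--
--     for num in data:
--         # Check if this is the start of a new character sequence
--         if remaining_bytes == 0:
--             if num >> 7 == 0b0:
--                 # Single-byte character
--                 continue
--             elif num >> 5 == 0b110:
--                 # Two-byte character
--                 remaining_bytes = 1
--             elif num >> 4 == 0b1110:
--                 # Three-byte character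
--                 remaining_bytes = 2
--             elif num >> 3 == 0b11110:
--                 # Four-byte character
--                 remaining_bytes = 3
--             else:
--                 # Invalid start of a sequence
--                 return False
--         else:
--             # Check if the current byte is following the format 10xxxxxx
--             if num >> 6 != 0b10:
--                 return False
--             remaining_bytes -= 1
--
--     # Check if all bytes were used in character sequences
--     return remaining_bytes == 0
-- ===== SOURCE B (Python) =====
-- def validUTF8(data):
--     """Determines if a given data set represents a valid UTF-8 encoding"""
--     n = len(data)
--     i = 0
--     while i < n:
--         num = data[i]
--         if num >> 7 == 0b0:
--             k = 0
--         elif num >> 5 == 0b110: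
--             k = 1
--         elif num >> 4 == 0b1110:
--             k = 2
--         elif num >> 3 == 0b11110:
--             k = 3
--         else:
--             return False
--         for j in range(i + 1, i + 1 + k):
--             if j >= n or data[j] >> 6 != 0b10:
--                 return False
--         i += 1 + k
--     return True
-- ===== Notes on version B (the rewrite author's own statement) =====
-- stated objective: alternative
-- what changed: Replaces A's flat single pass with a remaining-bytes counter by an explicit index walk that decodes each sequence length from the leading byte and verifies the continuation bytes in a nested inner loop.
import Mathlib
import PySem

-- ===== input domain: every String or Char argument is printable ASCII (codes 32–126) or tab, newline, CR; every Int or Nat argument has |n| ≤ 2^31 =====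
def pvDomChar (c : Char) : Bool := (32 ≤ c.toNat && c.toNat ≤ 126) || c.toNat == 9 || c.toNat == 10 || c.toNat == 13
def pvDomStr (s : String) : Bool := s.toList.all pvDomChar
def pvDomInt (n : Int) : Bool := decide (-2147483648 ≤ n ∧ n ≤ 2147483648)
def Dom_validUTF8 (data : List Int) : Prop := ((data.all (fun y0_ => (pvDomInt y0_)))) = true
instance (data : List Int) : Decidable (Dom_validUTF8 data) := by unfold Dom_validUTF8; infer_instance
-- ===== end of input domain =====

-- B replaces A's flat counter-driven pass by an explicit index walk that decodes each
-- sequence length from its leading byte and checks the continuation bytes in an inner loop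
-- (objective: alternative decomposition, same cost).

-- ===== PORT A =====
-- the for-loop over data with state remaining_bytes; early 'return False' = result false
def validUTF8Go (remaining : Int) (data : List Int) : Bool :=
  match data with
  | [] => remaining == 0
  | num :: rest =>
    if remaining == 0 then
      if num >>> (7 : Nat) == 0 then validUTF8Go remaining rest        -- continue
      else if num >>> (5 : Nat) == 6 then validUTF8Go 1 rest
      else if num >>> (4 : Nat) == 14 then validUTF8Go 2 rest
      else if num >>> (3 : Nat) == 30 then validUTF8Go 3 rest
      else false
    else
      if num >>> (6 : Nat) != 2 then false
      else validUTF8Go (remaining - 1) rest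

def validUTF8 (data : List Int) : Bool := validUTF8Go 0 data

-- ===== PORT B =====
-- leading-byte decode: number of continuation bytes, none = invalid start
def leadK? (num : Int) : Option Nat :=
  if num >>> (7 : Nat) == 0 then some 0
  else if num >>> (5 : Nat) == 6 then some 1
  else if num >>> (4 : Nat) == 14 then some 2
  else if num >>> (3 : Nat) == 30 then some 3
  else none

-- the inner 'for j in range(i+1, i+1+k)' loop of Source B
def contOk (data : List Int) (j k : Nat) : Bool :=
  match k with
  | 0 => true
  | k + 1 =>
    if h : j < data.length then
      (data[j] >>> (6 : Nat) == 2) && contOk data (j + 1) k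
    else false

-- the outer 'while i < n' loop of Source B
def altGo (data : List Int) (i : Nat) : Bool :=
  if h : i < data.length then
    match leadK? data[i] with
    | none => false
    | some k => if contOk data (i + 1) k then altGo data (i + 1 + k) else false
  else true
termination_by data.length - i
decreasing_by omega

def validUTF8_alt (data : List Int) : Bool := altGo data 0

-- ===== PRECONDITION & SPEC =====
def Spec_validUTF8 (data : List Int) (out : Bool) : Prop := out = validUTF8_alt data
instance (data : List Int) (out : Bool) : Decidable (Spec_validUTF8 data out) := by unfold Spec_validUTF8; infer_instance

-- ===== CLAIM (what is proved, stated in full; the proofs are below) =====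
def Claim_equal_validUTF8 : Prop := ∀ (data : List Int), Dom_validUTF8 data → Spec_validUTF8 data (validUTF8 data)

-- ===== LEMMAS AND PROOFS =====

-- proof-side common form: recursion on the suffix, one UTF-8 character at a time
def contB (k : Nat) (xs : List Int) : Bool :=
  match k, xs with
  | 0, _ => true
  | _ + 1, [] => false
  | k + 1, x :: rest => (x >>> (6 : Nat) == 2) && contB k rest

def sRec (xs : List Int) : Bool :=
  match xs with
  | [] => true
  | x :: rest =>
    match leadK? x with
    | none => false
    | some k => if contB k rest then sRec (rest.drop k) else false
termination_by xs.length
decreasing_by simp only [List.length_cons, List.length_drop]; omega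

theorem validUTF8Go_eq_sRec (xs : List Int) (k : Nat) :
    validUTF8Go (k : Int) xs = (contB k xs && sRec (xs.drop k)) := by
  induction xs generalizing k with
  | nil =>
    cases k with
    | zero => simp [validUTF8Go, contB, sRec.eq_def]
    | succ j => simp [validUTF8Go, contB]; omega
  | cons x rest ih =>
    cases k with
    | zero =>
      show validUTF8Go 0 (x :: rest) = _
      rw [validUTF8Go, sRec.eq_def]
      simp only [contB, List.drop_zero, Bool.true_and]
      unfold leadK?
      by_cases h1 : x >>> (7 : Nat) == 0
      · simpa [h1, contB] using ih 0
      · by_cases h2 : x >>> (5 : Nat) == 6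
        · simpa [h1, h2] using ih 1
        · by_cases h3 : x >>> (4 : Nat) == 14
          · simpa [h1, h2, h3] using ih 2
          · by_cases h4 : x >>> (3 : Nat) == 30
            · simpa [h1, h2, h3, h4] using ih 3
            · simp [h1, h2, h3, h4]
    | succ j =>
      rw [validUTF8Go]
      have hne : (((j + 1 : Nat) : Int) == 0) = false := by simp; omega
      simp only [hne, Bool.false_eq_true, if_false, contB]
      by_cases hc : x >>> (6 : Nat) == 2
      · have hd : ((x >>> (6 : Nat) : Int) != 2) = false := by simp_all
        have hcast : ((j + 1 : Nat) : Int) - 1 = ((j : Nat) : Int) := by push_cast; ring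
        simp only [hd, Bool.false_eq_true, if_false, hc, Bool.true_and, hcast, ih j,
          List.drop_succ_cons]
      · have hd : ((x >>> (6 : Nat) : Int) != 2) = true := by simp_all
        simp [hd, hc]

theorem contOk_eq_contB (data : List Int) (j k : Nat) :
    contOk data j k = contB k (data.drop j) := by
  induction k generalizing j with
  | zero => simp [contOk, contB]
  | succ m ih =>
    rw [contOk]
    by_cases h : j < data.length
    · have hdrop : data.drop j = data[j] :: data.drop (j + 1) :=
        List.drop_eq_getElem_cons h
      rw [dif_pos h, hdrop, contB, ih]
    · have hdrop : data.drop j = [] := List.drop_eq_nil_of_le (by omega)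
      simp [h, hdrop, contB]

theorem altGo_eq_sRec (data : List Int) (i : Nat) :
    altGo data i = sRec (data.drop i) := by
  induction i using altGo.induct data with
  | case1 i h hk =>
    have hdrop : data.drop i = data[i] :: data.drop (i + 1) :=
      List.drop_eq_getElem_cons h
    rw [altGo, sRec.eq_def, hdrop]
    simp [h, hk]
  | case2 i h k hk hc ih =>
    have hdrop : data.drop i = data[i] :: data.drop (i + 1) :=
      List.drop_eq_getElem_cons h
    rw [altGo, sRec.eq_def, hdrop]
    rw [contOk_eq_contB] at hc
    have hdd : (data.drop (i + 1)).drop k = data.drop (i + 1 + k) := by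
      rw [List.drop_drop]
    simp [contOk_eq_contB, h, hk, hc, ih, hdd]
  | case3 i h k hk hc =>
    have hdrop : data.drop i = data[i] :: data.drop (i + 1) :=
      List.drop_eq_getElem_cons h
    rw [altGo, sRec.eq_def, hdrop]
    rw [contOk_eq_contB] at hc
    simp [contOk_eq_contB, h, hk, hc]
  | case4 i h =>
    have hdrop : data.drop i = [] := List.drop_eq_nil_of_le (by omega)
    rw [altGo, sRec.eq_def, hdrop]
    simp [h]

-- ===== VERDICT (by name: the statement is the Claim_ definition above) =====
theorem validUTF8_spec : Claim_equal_validUTF8 := by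
  intro data _
  show validUTF8 data = validUTF8_alt data
  have hA : validUTF8 data = sRec data := by
    have := validUTF8Go_eq_sRec data 0
    simpa [validUTF8, contB] using this
  have hB : validUTF8_alt data = sRec data := by
    simpa using altGo_eq_sRec data 0
  rw [hA, hB]
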